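-- pv_equiv track=rewrite | github.com/kf-nyu/cross_national_cve | scripts/extract_all_cves.py | extract_cwe_ids
-- ===== SOURCE A (Python) =====
-- from typing import Dict, List, Any, Optional
--
-- def extract_cwe_ids(problem_types: List) -> tuple:
--     cwe_ids = []
--     cwe_descriptions = []
--     problem_type_texts = []
--
--     if not problem_types:
--         return ("", "", "")
--
--     for pt in problem_types:
--         descriptions = pt.get("descriptions", [])
--         for desc in descriptions:
--             desc_type = desc.get("type", "")
--             if desc_type == "CWE":
--                 cwe_id = desc.get("cweId", "")
--                 cwe_desc = desc.get("description", "")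
--                 if cwe_id:
--                     cwe_ids.append(cwe_id)
--                 if cwe_desc:
--                     cwe_descriptions.append(cwe_desc)
--             elif desc_type == "text":
--                 text_desc = desc.get("description", "")
--                 if text_desc:
--                     problem_type_texts.append(text_desc)
--
--     return (
--         "|".join(cwe_ids),
--         "|".join(cwe_descriptions),
--         "|".join(problem_type_texts)
--     )
-- ===== SOURCE B (Python) =====
-- def extract_cwe_ids(problem_types):
--     if not problem_types:
--         return ("", "", "")
--     cwe_ids = [d.get("cweId") for pt in problem_types
--                for d in pt.get("descriptions", [])
--                if d.get("type") == "CWE" and d.get("cweId")]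
--     cwe_descriptions = [d.get("description") for pt in problem_types
--                         for d in pt.get("descriptions", [])
--                         if d.get("type") == "CWE" and d.get("description")]
--     problem_type_texts = [d.get("description") for pt in problem_types
--                           for d in pt.get("descriptions", [])
--                           if d.get("type") == "text" and d.get("description")]
--     return ("|".join(cwe_ids), "|".join(cwe_descriptions), "|".join(problem_type_texts))
-- ===== Notes on version B (the rewrite author's own statement) =====
-- stated objective: simpler
-- what changed: Replaces A's single interleaved pass that threads three accumulator lists through nested loops with three independent flat double comprehensions, one per output field, each joined with '|'.
import Mathlib
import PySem

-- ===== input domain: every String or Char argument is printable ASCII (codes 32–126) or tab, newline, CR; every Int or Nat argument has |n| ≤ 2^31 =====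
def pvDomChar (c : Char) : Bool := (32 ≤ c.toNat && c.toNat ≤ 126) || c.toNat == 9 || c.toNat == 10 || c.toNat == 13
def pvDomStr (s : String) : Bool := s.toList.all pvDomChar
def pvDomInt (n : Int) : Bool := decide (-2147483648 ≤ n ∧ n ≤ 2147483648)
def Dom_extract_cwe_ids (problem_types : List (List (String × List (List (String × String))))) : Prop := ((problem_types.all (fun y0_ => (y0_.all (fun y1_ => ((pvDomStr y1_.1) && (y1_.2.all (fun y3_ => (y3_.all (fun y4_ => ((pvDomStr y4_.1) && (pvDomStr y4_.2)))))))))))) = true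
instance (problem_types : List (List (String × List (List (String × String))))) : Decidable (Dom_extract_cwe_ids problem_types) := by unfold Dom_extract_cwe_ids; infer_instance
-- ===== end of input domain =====

-- B replaces A's single interleaved pass with three independent flat comprehensions (objective: simpler decomposition, same cost).

-- dict.get with default over an association list (first match = Python dict semantics under the type convention)
def pvGetD {α : Type} (l : List (String × α)) (k : String) (dflt : α) : α :=
  match l.find? (fun p => p.1 == k) with
  | some p => p.2
  | none => dflt

-- ===== PORT A =====
def extract_cwe_ids (problem_types : List (List (String × List (List (String × String))))) : String × String × String :=
  if problem_types.isEmpty then ("", "", "") else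
  let st := problem_types.foldl (fun (acc : List String × List String × List String) pt =>
    let descriptions := pvGetD pt "descriptions" []
    descriptions.foldl (fun acc desc =>
      let desc_type := pvGetD desc "type" ""
      if desc_type = "CWE" then
        let cwe_id := pvGetD desc "cweId" ""
        let cwe_desc := pvGetD desc "description" ""
        let acc1 := if cwe_id ≠ "" then (acc.1 ++ [cwe_id], acc.2.1, acc.2.2) else acc
        if cwe_desc ≠ "" then (acc1.1, acc1.2.1 ++ [cwe_desc], acc1.2.2) else acc1
      else if desc_type = "text" then
        let text_desc := pvGetD desc "description" ""
        if text_desc ≠ "" then (acc.1, acc.2.1, acc.2.2 ++ [text_desc]) else acc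
      else acc) acc) ([], [], [])
  (PySem.Str.join "|" st.1, PySem.Str.join "|" st.2.1, PySem.Str.join "|" st.2.2)

-- ===== PORT B =====
-- the three flat comprehensions of Source B
def altIds (problem_types : List (List (String × List (List (String × String))))) : List String :=
  problem_types.flatMap (fun pt =>
    (pvGetD pt "descriptions" []).filterMap (fun d =>
      if pvGetD d "type" "" = "CWE" ∧ pvGetD d "cweId" "" ≠ "" then some (pvGetD d "cweId" "") else none))

def altDescs (problem_types : List (List (String × List (List (String × String))))) : List String :=
  problem_types.flatMap (fun pt =>
    (pvGetD pt "descriptions" []).filterMap (fun d =>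
      if pvGetD d "type" "" = "CWE" ∧ pvGetD d "description" "" ≠ "" then some (pvGetD d "description" "") else none))

def altTexts (problem_types : List (List (String × List (List (String × String))))) : List String :=
  problem_types.flatMap (fun pt =>
    (pvGetD pt "descriptions" []).filterMap (fun d =>
      if pvGetD d "type" "" = "text" ∧ pvGetD d "description" "" ≠ "" then some (pvGetD d "description" "") else none))

def extract_cwe_ids_alt (problem_types : List (List (String × List (List (String × String))))) : String × String × String :=
  if problem_types.isEmpty then ("", "", "") else
  (PySem.Str.join "|" (altIds problem_types),
   PySem.Str.join "|" (altDescs problem_types),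
   PySem.Str.join "|" (altTexts problem_types))

-- ===== PRECONDITION & SPEC =====
def Spec_extract_cwe_ids (problem_types : List (List (String × List (List (String × String))))) (out : String × String × String) : Prop := out = extract_cwe_ids_alt problem_types
instance (problem_types : List (List (String × List (List (String × String))))) (out : String × String × String) : Decidable (Spec_extract_cwe_ids problem_types out) := by unfold Spec_extract_cwe_ids; infer_instance

-- ===== CLAIM (what is proved, stated in full; the proofs are below) =====
def Claim_equal_extract_cwe_ids : Prop := ∀ (problem_types : List (List (String × List (List (String × String))))), Dom_extract_cwe_ids problem_types → Spec_extract_cwe_ids problem_types (extract_cwe_ids problem_types)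

-- ===== LEMMAS AND PROOFS =====

-- A's inner loop appends, per description, exactly what B's three filterMaps collect.
theorem inner_fold (ds : List (List (String × String))) :
    ∀ acc : List String × List String × List String,
    ds.foldl (fun acc desc =>
      let desc_type := pvGetD desc "type" ""
      if desc_type = "CWE" then
        let cwe_id := pvGetD desc "cweId" ""
        let cwe_desc := pvGetD desc "description" ""
        let acc1 := if cwe_id ≠ "" then (acc.1 ++ [cwe_id], acc.2.1, acc.2.2) else acc
        if cwe_desc ≠ "" then (acc1.1, acc1.2.1 ++ [cwe_desc], acc1.2.2) else acc1
      else if desc_type = "text" then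
        let text_desc := pvGetD desc "description" ""
        if text_desc ≠ "" then (acc.1, acc.2.1, acc.2.2 ++ [text_desc]) else acc
      else acc) acc
    = (acc.1 ++ ds.filterMap (fun d =>
         if pvGetD d "type" "" = "CWE" ∧ pvGetD d "cweId" "" ≠ "" then some (pvGetD d "cweId" "") else none),
       acc.2.1 ++ ds.filterMap (fun d =>
         if pvGetD d "type" "" = "CWE" ∧ pvGetD d "description" "" ≠ "" then some (pvGetD d "description" "") else none),
       acc.2.2 ++ ds.filterMap (fun d =>
         if pvGetD d "type" "" = "text" ∧ pvGetD d "description" "" ≠ "" then some (pvGetD d "description" "") else none)) := by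
  induction ds with
  | nil => intro acc; simp
  | cons d ds ih =>
    intro acc
    simp only [List.foldl_cons, List.filterMap_cons, ih]
    by_cases h1 : pvGetD d "type" "" = "CWE" <;>
      by_cases h2 : pvGetD d "cweId" "" ≠ "" <;>
        by_cases h3 : pvGetD d "description" "" ≠ "" <;>
          by_cases h4 : pvGetD d "type" "" = "text" <;>
            simp_all

-- A's full fold computes (altIds, altDescs, altTexts).
theorem outer_fold (pts : List (List (String × List (List (String × String))))) :
    ∀ acc : List String × List String × List String,
    pts.foldl (fun (acc : List String × List String × List String) pt =>
      let descriptions := pvGetD pt "descriptions" []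
      descriptions.foldl (fun acc desc =>
        let desc_type := pvGetD desc "type" ""
        if desc_type = "CWE" then
          let cwe_id := pvGetD desc "cweId" ""
          let cwe_desc := pvGetD desc "description" ""
          let acc1 := if cwe_id ≠ "" then (acc.1 ++ [cwe_id], acc.2.1, acc.2.2) else acc
          if cwe_desc ≠ "" then (acc1.1, acc1.2.1 ++ [cwe_desc], acc1.2.2) else acc1
        else if desc_type = "text" then
          let text_desc := pvGetD desc "description" ""
          if text_desc ≠ "" then (acc.1, acc.2.1, acc.2.2 ++ [text_desc]) else acc
        else acc) acc) acc
    = (acc.1 ++ altIds pts, acc.2.1 ++ altDescs pts, acc.2.2 ++ altTexts pts) := by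
  induction pts with
  | nil => intro acc; simp [altIds, altDescs, altTexts]
  | cons pt pts ih =>
    intro acc
    rw [List.foldl_cons, inner_fold, ih]
    simp [altIds, altDescs, altTexts]

-- ===== VERDICT (by name: the statement is the Claim_ definition above) =====
theorem extract_cwe_ids_spec : Claim_equal_extract_cwe_ids := by
  intro pts _
  unfold Spec_extract_cwe_ids extract_cwe_ids extract_cwe_ids_alt
  by_cases h : pts.isEmpty
  · simp [h]
  · rw [if_neg h, if_neg h]
    simp only [outer_fold]
    simp
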